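-- pv_equiv track=rewrite | github.com/AGONIXX15/automata_and_grammar | Model/state_machine.py | fsm_mod5
-- ===== SOURCE A (Python) =====
-- def fsm_mod5(string: str):
--     """estados vienen siendo q0 = 0, q1 = 1, q2 = 2,
--     q3 = 3,  q4 = 4
--     pq vamos a calcular solo el modulo de 5
--     formula de estado (residuo * 2 + bit) % 5"""
--     # q0 estado inicial
--     state: int = 0
--
--     transitions = {
--         0: {'0': 0, '1': 1},
--         1: {'0': 2, '1': 3},
--         2: {'0': 4, '1': 0},
--         3: {'0': 1, '1': 2},
--         4: {'0': 3, '1': 4}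
--     }
--
--     for bit in string:
--         state = transitions[state][bit]
--
--     return state
-- ===== SOURCE B (Python) =====
-- def fsm_mod5(string: str):
--     """Positional evaluation from the least-significant bit: sum bit*2^i,
--     keeping the power of two reduced mod 5, with one final mod."""
--     bit_value = {'0': 0, '1': 1}
--     total = 0
--     power = 1
--     for bit in reversed(string):
--         total += bit_value[bit] * power
--         power = power * 2 % 5
--     return total % 5
-- ===== Notes on version B (the rewrite author's own statement) =====
-- stated objective: alternative
-- what changed: Replaced the left-to-right DFA/Horner pass (transition table, state reduced mod 5 each step) by right-to-left positional evaluation: iterate the string reversed, accumulate bit*2^i with the power of two maintained mod 5, and take a single mod at the end.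
import Mathlib
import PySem

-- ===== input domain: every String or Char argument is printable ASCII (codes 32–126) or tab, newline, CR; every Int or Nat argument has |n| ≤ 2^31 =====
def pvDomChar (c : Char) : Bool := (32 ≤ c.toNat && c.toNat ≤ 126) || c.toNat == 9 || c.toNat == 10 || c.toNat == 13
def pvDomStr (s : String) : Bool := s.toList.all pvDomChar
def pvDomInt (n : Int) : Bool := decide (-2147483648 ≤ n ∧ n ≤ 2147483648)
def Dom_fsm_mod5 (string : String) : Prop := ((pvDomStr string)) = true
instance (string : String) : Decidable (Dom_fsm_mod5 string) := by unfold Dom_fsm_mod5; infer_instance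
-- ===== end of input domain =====

-- B replaces A's left-to-right DFA pass with right-to-left positional evaluation
-- (sum of bit * 2^i, power kept mod 5, one final mod) — objective: alternative.

-- ===== PORT A =====
-- A's nested transition dict, transliterated
def fsmTransitions : PySem.Dict Int (PySem.Dict Char Int) :=
  PySem.Dict.ofList
    [ (0, PySem.Dict.ofList [('0', 0), ('1', 1)])
    , (1, PySem.Dict.ofList [('0', 2), ('1', 3)])
    , (2, PySem.Dict.ofList [('0', 4), ('1', 0)])
    , (3, PySem.Dict.ofList [('0', 1), ('1', 2)])
    , (4, PySem.Dict.ofList [('0', 3), ('1', 4)]) ]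

-- A's loop; none = KeyError (excluded by Pre_)
def fsmLoopA : Int → List Char → Option Int
  | state, [] => some state
  | state, bit :: rest =>
    match fsmTransitions.get? state with
    | none => none
    | some row =>
      match row.get? bit with
      | none => none
      | some s' => fsmLoopA s' rest

def fsm_mod5 (string : String) : Int := (fsmLoopA 0 string.toList).getD 0

-- ===== PORT B =====
def fsmBitValue : PySem.Dict Char Int := PySem.Dict.ofList [('0', 0), ('1', 1)]

-- B's loop over the reversed string, carrying (total, power); none = KeyError (excluded by Pre_)
def fsmLoopB : Int → Int → List Char → Option Int
  | total, _, [] => some total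
  | total, power, bit :: rest =>
    match fsmBitValue.get? bit with
    | none => none
    | some v => fsmLoopB (total + v * power) (PySem.Int.mod (power * 2) 5) rest

def fsm_mod5_alt (string : String) : Int :=
  match fsmLoopB 0 1 string.toList.reverse with
  | none => 0
  | some t => PySem.Int.mod t 5

-- ===== PRECONDITION & SPEC =====
-- Pre_ excludes strings containing any non-binary-digit character: there A raises KeyError (and B does too).
def Pre_fsm_mod5 (string : String) : Prop := string.toList.all (fun c => c == '0' || c == '1') = true
instance (string : String) : Decidable (Pre_fsm_mod5 string) := by unfold Pre_fsm_mod5; infer_instance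
def pvWitness_fsm_mod5 : String := "10110"

def Spec_fsm_mod5 (string : String) (out : Int) : Prop := out = fsm_mod5_alt string
instance (string : String) (out : Int) : Decidable (Spec_fsm_mod5 string out) := by unfold Spec_fsm_mod5; infer_instance

-- ===== CLAIM (what is proved, stated in full; the proofs are below) =====
def Claim_equal_fsm_mod5 : Prop := ∀ (string : String), Dom_fsm_mod5 string → Pre_fsm_mod5 string → Spec_fsm_mod5 string (fsm_mod5 string)

-- ===== LEMMAS AND PROOFS =====
-- mathematical bit value of a binary digit
def fsmBv (c : Char) : Int := if c = '1' then 1 else 0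

-- value of a bit list, least-significant bit FIRST
def fsmLsb : List Char → Int
  | [] => 0
  | c :: r => fsmBv c + 2 * fsmLsb r

-- A's loop computes the Horner fold reduced mod 5 at every step
theorem fsmLoopA_eq (l : List Char) (h : ∀ c ∈ l, c = '0' ∨ c = '1') :
    ∀ state : Int, 0 ≤ state → state < 5 →
      fsmLoopA state l = some (l.foldl (fun a c => (2 * a + fsmBv c) % 5) state) := by
  induction l with
  | nil => intro state h0 h5; simp [fsmLoopA]
  | cons c rest ih =>
    intro state h0 h5
    have hc : c = '0' ∨ c = '1' := h c (List.mem_cons_self ..)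
    have hrest : ∀ x ∈ rest, x = '0' ∨ x = '1' := fun x hx => h x (List.mem_cons_of_mem _ hx)
    interval_cases state <;> rcases hc with rfl | rfl <;>
      simp only [fsmLoopA, fsmTransitions, List.foldl_cons] <;>
      norm_num [PySem.Dict.ofList, PySem.Dict.get?, fsmBv] <;>
      exact ih hrest _ (by norm_num) (by norm_num)

-- the plain Horner fold respects congruence mod 5 in its seed
theorem fsm_foldl_mod_congr (l : List Char) :
    ∀ a b : Int, a % 5 = b % 5 →
      (l.foldl (fun a c => 2 * a + fsmBv c) a) % 5
        = (l.foldl (fun a c => 2 * a + fsmBv c) b) % 5 := by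
  induction l with
  | nil => intro a b hab; simpa using hab
  | cons c rest ih =>
    intro a b hab
    simp only [List.foldl_cons]
    exact ih _ _ (by omega)

theorem fsm_foldl_mod (l : List Char) (s : Int) (h0 : 0 ≤ s) (h5 : s < 5) :
    l.foldl (fun a c => (2 * a + fsmBv c) % 5) s
      = (l.foldl (fun a c => 2 * a + fsmBv c) s) % 5 := by
  induction l generalizing s with
  | nil => simp [Int.emod_eq_of_lt h0 h5]
  | cons c rest ih =>
    simp only [List.foldl_cons]
    rw [ih _ (Int.emod_nonneg _ (by norm_num)) (Int.emod_lt_of_pos _ (by norm_num))]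
    exact fsm_foldl_mod_congr rest _ _ (Int.emod_emod_of_dvd _ (by norm_num : (5:Int) ∣ 5))

-- appending a bit at the end adds bv c * 2^(length)
theorem fsmLsb_append (m : List Char) (c : Char) :
    fsmLsb (m ++ [c]) = fsmLsb m + fsmBv c * 2 ^ m.length := by
  induction m with
  | nil => simp [fsmLsb]
  | cons d r ih => simp [fsmLsb, ih, List.length_cons]; ring

-- the Horner fold on l equals the LSB-first value of l.reverse plus the seed shifted left
theorem fsm_horner_eq (l : List Char) :
    ∀ a : Int, l.foldl (fun a c => 2 * a + fsmBv c) a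
      = fsmLsb l.reverse + a * 2 ^ l.length := by
  induction l with
  | nil => intro a; simp [fsmLsb]
  | cons c rest ih =>
    intro a
    simp only [List.foldl_cons, List.reverse_cons, List.length_cons]
    rw [ih, fsmLsb_append]
    simp [List.length_reverse]
    ring

-- B's loop is total on binary lists and returns total + power * value (mod 5), for any in-range power
theorem fsmLoopB_eq (m : List Char) (h : ∀ c ∈ m, c = '0' ∨ c = '1') :
    ∀ total power : Int, ∃ t, fsmLoopB total power m = some t ∧
      t % 5 = (total + power * fsmLsb m) % 5 := by
  induction m with
  | nil => intro total power; exact ⟨total, rfl, by simp [fsmLsb]⟩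
  | cons c rest ih =>
    intro total power
    have hc : c = '0' ∨ c = '1' := h c (List.mem_cons_self ..)
    have hrest : ∀ x ∈ rest, x = '0' ∨ x = '1' := fun x hx => h x (List.mem_cons_of_mem _ hx)
    obtain ⟨t, ht, hmod⟩ := ih hrest (total + fsmBv c * power) (PySem.Int.mod (power * 2) 5)
    have g0 : fsmBitValue.get? '0' = some 0 := by decide
    have g1 : fsmBitValue.get? '1' = some 1 := by decide
    refine ⟨t, ?_, ?_⟩
    · rcases hc with rfl | rfl <;>
        simp only [fsmLoopB, g0, g1] <;> simpa [fsmBv] using ht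
    · rw [hmod]
      have h2 : PySem.Int.mod (power * 2) 5 = (power * 2) % 5 :=
        PySem.Int.mod_eq_emod_of_pos (by norm_num)
      rw [h2]
      have : (total + fsmBv c * power + (power * 2) % 5 * fsmLsb rest) % 5
           = (total + fsmBv c * power + power * 2 * fsmLsb rest) % 5 := by
        conv_lhs => rw [Int.add_emod, Int.mul_emod, Int.emod_emod_of_dvd _ (by norm_num : (5:Int) ∣ 5)]
        rw [← Int.mul_emod, ← Int.add_emod]
      rw [this, fsmLsb]
      ring_nf

-- ===== VERDICT (by name: the statement is the Claim_ definition above) =====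
theorem fsm_mod5_spec : Claim_equal_fsm_mod5 := by
  intro s _ hpre
  unfold Spec_fsm_mod5 fsm_mod5 fsm_mod5_alt
  have h : ∀ c ∈ s.toList, c = '0' ∨ c = '1' := by
    intro c hc
    have := List.all_eq_true.mp hpre c hc
    simpa using this
  have hrev : ∀ c ∈ s.toList.reverse, c = '0' ∨ c = '1' := by
    intro c hc; exact h c (List.mem_reverse.mp hc)
  obtain ⟨t, ht, hmod⟩ := fsmLoopB_eq s.toList.reverse hrev 0 1
  rw [fsmLoopA_eq s.toList h 0 (by norm_num) (by norm_num), ht]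
  simp only [Option.getD_some]
  rw [fsm_foldl_mod s.toList 0 (by norm_num) (by norm_num),
      fsm_horner_eq s.toList 0,
      PySem.Int.mod_eq_emod_of_pos (by norm_num : (0:Int) < 5), hmod]
  ring_nf
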